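-- pv_equiv track=rewrite | github.com/malkiats/CICD | auto_deploy.py | update_content
-- ===== SOURCE A (Python) =====
-- def update_content(file_content: str, release_tag: str) -> str:
--     """Updates the file content with the new release tag.
--
--     Args:
--         file_content (str): The original file content.
--         release_tag (str): The new release tag to be added.
--
--     Returns:
--         str: Updated file content.
--     """
--     updated_content: list[str] = []
--     for line in file_content.split("\n"):
--         if line.startswith("export IMAGE_VERSION="):
--             updated_content.append(f"export IMAGE_VERSION={release_tag}")
--         else:
--             updated_content.append(line)
--     return "\n".join(updated_content)
-- ===== SOURCE B (Python) =====
-- import re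
--
-- _LINE_RE = re.compile(r"^export IMAGE_VERSION=.*$", re.MULTILINE)
--
--
-- def update_content(file_content: str, release_tag: str) -> str:
--     """Updates the file content with the new release tag."""
--     # Function replacement so backslashes/backreferences in release_tag are literal.
--     return _LINE_RE.sub(lambda _m: f"export IMAGE_VERSION={release_tag}", file_content)
-- ===== Notes on version B (the rewrite author's own statement) =====
-- stated objective: idiomatic
-- what changed: Replaces the split/loop/join line rebuild with a single precompiled multiline regex substitution (re.sub with ^export IMAGE_VERSION=.*$ and a function replacement so the tag is inserted literally).
import Mathlib
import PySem

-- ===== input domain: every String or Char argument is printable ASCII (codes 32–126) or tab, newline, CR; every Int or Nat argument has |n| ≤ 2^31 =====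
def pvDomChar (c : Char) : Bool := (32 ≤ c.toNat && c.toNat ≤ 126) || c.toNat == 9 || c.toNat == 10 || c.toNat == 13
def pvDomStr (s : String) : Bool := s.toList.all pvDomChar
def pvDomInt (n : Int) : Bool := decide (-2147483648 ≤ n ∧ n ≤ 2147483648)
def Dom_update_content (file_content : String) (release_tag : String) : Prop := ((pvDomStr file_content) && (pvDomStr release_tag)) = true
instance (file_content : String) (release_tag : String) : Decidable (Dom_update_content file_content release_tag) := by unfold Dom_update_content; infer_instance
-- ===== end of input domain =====

-- B replaces A's split/loop/join line rebuild with one multiline-regex substitution pass (idiomatic); equal return value on all inputs.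

-- ===== PORT A =====
def update_content (file_content : String) (release_tag : String) : String :=
  -- sep "\n" is non-empty, so Python's split never raises: split? is `some` here and getD [] is never taken
  let lines := (PySem.Str.split? file_content "\n").getD []
  let updated := lines.foldl
    (fun acc line =>
      if PySem.Str.startswith line "export IMAGE_VERSION=" then
        acc ++ ["export IMAGE_VERSION=" ++ release_tag]
      else
        acc ++ [line]) []
  PySem.Str.join "\n" updated

-- ===== PORT B =====
-- Hand-port of `re.sub(r"^export IMAGE_VERSION=.*$", lambda m: "export IMAGE_VERSION=" + tag, s, flags=re.MULTILINE)`: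
-- the engine anchors ^ at the string start and after each '\n', '.' never matches '\n', $ stops before '\n' or at the end,
-- and the function replacement inserts the tag literally; the scanner below performs exactly this pass and is exact for
-- this fixed pattern on every input string.
def pvTagPrefix : List Char := "export IMAGE_VERSION=".toList

def pvReSub (release_tag : List Char) (cs : List Char) : List Char :=
  let line := cs.takeWhile (fun c => c ≠ '\n')
  (if pvTagPrefix.isPrefixOf line then pvTagPrefix ++ release_tag else line) ++
    (match h : cs.dropWhile (fun c => c ≠ '\n') with
     | [] => []
     | _ :: tail => '\n' :: pvReSub release_tag tail)
termination_by cs.length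
decreasing_by
  have hle := List.length_dropWhile_le (fun c => decide (c ≠ '\n')) cs
  rw [h] at hle; simp at hle; omega

def update_content_alt (file_content : String) (release_tag : String) : String :=
  String.ofList (pvReSub release_tag.toList file_content.toList)

-- ===== PRECONDITION & SPEC =====
def Spec_update_content (file_content : String) (release_tag : String) (out : String) : Prop := out = update_content_alt file_content release_tag
instance (file_content : String) (release_tag : String) (out : String) : Decidable (Spec_update_content file_content release_tag out) := by unfold Spec_update_content; infer_instance

-- ===== CLAIM (what is proved, stated in full; the proofs are below) =====
def Claim_equal_update_content : Prop := ∀ (file_content : String) (release_tag : String), Dom_update_content file_content release_tag → Spec_update_content file_content release_tag (update_content file_content release_tag)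

-- ===== LEMMAS AND PROOFS =====

-- structural characterisation of splitting at '\n'
def pvSplit (cs : List Char) : List (List Char) :=
  cs.takeWhile (fun c => c ≠ '\n') ::
    (match h : cs.dropWhile (fun c => c ≠ '\n') with
     | [] => []
     | _ :: tail => pvSplit tail)
termination_by cs.length
decreasing_by
  have hle := List.length_dropWhile_le (fun c => decide (c ≠ '\n')) cs
  rw [h] at hle; simp at hle; omega

def pvHeadCons (p : List Char) : List (List Char) → List (List Char)
  | [] => [p]
  | x :: xs => (p ++ x) :: xs

lemma pvSplit_nilCase (cs : List Char) (h : cs.dropWhile (fun c => c ≠ '\n') = []) :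
    pvSplit cs = [cs.takeWhile (fun c => c ≠ '\n')] := by
  rw [pvSplit]; split
  · rfl
  · next d tail heq => rw [h] at heq; simp at heq

lemma pvSplit_consCase (cs : List Char) (d : Char) (tail : List Char)
    (h : cs.dropWhile (fun c => c ≠ '\n') = d :: tail) :
    pvSplit cs = cs.takeWhile (fun c => c ≠ '\n') :: pvSplit tail := by
  rw [pvSplit]; split
  · next heq => rw [h] at heq; simp at heq
  · next d' tail' heq =>
      rw [h] at heq; injection heq with h1 h2; subst h2; rfl

lemma pvReSub_nilCase (rt cs : List Char) (h : cs.dropWhile (fun c => c ≠ '\n') = []) :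
    pvReSub rt cs
      = (if pvTagPrefix.isPrefixOf (cs.takeWhile (fun c => c ≠ '\n')) then
           pvTagPrefix ++ rt
         else cs.takeWhile (fun c => c ≠ '\n')) := by
  rw [pvReSub]
  split <;>
    (split
     · simp
     · rename_i d tail heq; rw [h] at heq; simp at heq)

lemma pvReSub_consCase (rt cs : List Char) (d : Char) (tail : List Char)
    (h : cs.dropWhile (fun c => c ≠ '\n') = d :: tail) :
    pvReSub rt cs
      = (if pvTagPrefix.isPrefixOf (cs.takeWhile (fun c => c ≠ '\n')) then
           pvTagPrefix ++ rt
         else cs.takeWhile (fun c => c ≠ '\n')) ++ '\n' :: pvReSub rt tail := by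
  rw [pvReSub]
  split <;>
    (split
     · rename_i heq; rw [h] at heq; simp at heq
     · rename_i d' tail' heq; rw [h] at heq; injection heq with h1 h2; subst h2; simp)

lemma pvSplit_ne_nil (cs : List Char) : pvSplit cs ≠ [] := by
  rw [pvSplit]; simp

lemma pvHeadCons_nil (X : List (List Char)) (hX : X ≠ []) : pvHeadCons [] X = X := by
  cases X with
  | nil => exact absurd rfl hX
  | cons x xs => simp [pvHeadCons]

lemma pvHeadCons_append (p q : List Char) (X : List (List Char)) :
    pvHeadCons p (pvHeadCons q X) = pvHeadCons (p ++ q) X := by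
  cases X <;> simp [pvHeadCons]

lemma pvSplit_cons (c : Char) (rest : List Char) (hc : ¬ c = '\n') :
    pvSplit (c :: rest) = pvHeadCons [c] (pvSplit rest) := by
  have h1 : (c :: rest).dropWhile (fun c => (c ≠ '\n' : Bool)) = rest.dropWhile (fun c => (c ≠ '\n' : Bool)) := by
    simp [hc]
  have h2 : (c :: rest).takeWhile (fun c => (c ≠ '\n' : Bool)) = c :: rest.takeWhile (fun c => (c ≠ '\n' : Bool)) := by
    simp [hc]
  cases hm : rest.dropWhile (fun c => (c ≠ '\n' : Bool)) with
  | nil =>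
      rw [pvSplit_nilCase _ (h1.trans hm), pvSplit_nilCase _ hm, h2]
      simp [pvHeadCons]
  | cons d tail =>
      rw [pvSplit_consCase _ _ _ (h1.trans hm), pvSplit_consCase _ _ _ hm, h2]
      simp [pvHeadCons]

lemma pvGo_eq (fuel : Nat) (l cur : List Char) (acc : List (List Char))
    (hf : l.length < fuel) :
    PySem.Chars.splitOn.go ['\n'] fuel l cur acc
      = acc.reverse ++ pvHeadCons cur.reverse (pvSplit l) := by
  induction fuel generalizing l cur acc with
  | zero => omega
  | succ fuel ih =>
    cases l with
    | nil =>
      rw [PySem.Chars.splitOn.go, pvSplit]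
      simp [pvHeadCons]
      omega
    | cons c rest =>
      by_cases hc : c = '\n'
      · subst hc
        rw [PySem.Chars.splitOn.go]
        have hpre : List.isPrefixOf ['\n'] ('\n' :: rest) = true := by
          simp [List.isPrefixOf]
        rw [if_pos hpre]
        rw [show List.drop (['\n'].length) ('\n' :: rest) = rest from rfl]
        rw [ih rest [] (cur.reverse :: acc) (by simp at hf ⊢; omega)]
        rw [pvSplit_consCase ('\n' :: rest) '\n' rest (by simp)]
        rw [show ('\n' :: rest).takeWhile (fun c => (c ≠ '\n' : Bool)) = [] from by simp]
        obtain ⟨p, ps, hps⟩ : ∃ p ps, pvSplit rest = p :: ps := by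
          cases hsp : pvSplit rest with
          | nil => exact absurd hsp (pvSplit_ne_nil rest)
          | cons x xs => exact ⟨x, xs, rfl⟩
        simp [pvHeadCons, hps]
      · rw [PySem.Chars.splitOn.go]
        have hpre : List.isPrefixOf ['\n'] (c :: rest) = false := by
          simp [List.isPrefixOf]
          exact fun h => hc h.symm
        rw [if_neg (by simp [hpre])]
        rw [ih rest (c :: cur) acc (by simp at hf ⊢; omega)]
        rw [pvSplit_cons c rest hc, pvHeadCons_append]
        simp

lemma pvSplitOn_eq (cs : List Char) :
    PySem.Chars.splitOn cs ['\n'] = pvSplit cs := by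
  show PySem.Chars.splitOn.go ['\n'] (cs.length + 1) cs [] [] = pvSplit cs
  rw [pvGo_eq _ _ _ _ (Nat.lt_succ_self _)]
  simp [pvHeadCons_nil _ (pvSplit_ne_nil cs)]

lemma pvFoldl_eq {α β : Type} (g : α → β) (xs : List α) (acc : List β) :
    xs.foldl (fun a x => a ++ [g x]) acc = acc ++ xs.map g := by
  induction xs generalizing acc with
  | nil => simp
  | cons x xs ih => simp [ih]

lemma pvMainAux (rt : List Char) (n : Nat) : ∀ (cs : List Char), cs.length ≤ n →
    pvReSub rt cs
      = PySem.Chars.join ['\n']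
          ((pvSplit cs).map (fun line =>
            if pvTagPrefix.isPrefixOf line then pvTagPrefix ++ rt else line)) := by
  induction n with
  | zero =>
    intro cs hcs
    have hnil : cs = [] := List.eq_nil_of_length_eq_zero (Nat.le_zero.mp hcs)
    subst hnil
    rw [pvReSub_nilCase _ _ (by simp), pvSplit_nilCase _ (by simp)]
    simp [PySem.Chars.join_singleton]
  | succ n ihn =>
    intro cs hcs
    cases hd : cs.dropWhile (fun c => (c ≠ '\n' : Bool)) with
    | nil =>
      rw [pvReSub_nilCase _ _ hd, pvSplit_nilCase _ hd]
      simp [PySem.Chars.join_singleton]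
    | cons d tail =>
      have htail : tail.length ≤ n := by
        have hle := List.length_dropWhile_le (fun c => decide (c ≠ '\n')) cs
        rw [hd] at hle; simp at hle; omega
      obtain ⟨p, ps, hps⟩ : ∃ p ps, pvSplit tail = p :: ps := by
        cases hsp : pvSplit tail with
        | nil => exact absurd hsp (pvSplit_ne_nil tail)
        | cons x xs => exact ⟨x, xs, rfl⟩
      rw [pvReSub_consCase _ _ _ _ hd, pvSplit_consCase _ _ _ hd]
      rw [ihn tail htail, hps]
      simp [PySem.Chars.join_cons_cons]

lemma pvMain (rt cs : List Char) :
    pvReSub rt cs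
      = PySem.Chars.join ['\n']
          ((pvSplit cs).map (fun line =>
            if pvTagPrefix.isPrefixOf line then pvTagPrefix ++ rt else line)) :=
  pvMainAux rt cs.length cs le_rfl

-- ===== VERDICT (by name: the statement is the Claim_ definition above) =====
theorem update_content_spec : Claim_equal_update_content := by
  intro fc rt _hdom
  unfold Spec_update_content update_content update_content_alt
  apply String.ext
  have hnl : ("\n" : String).toList = ['\n'] := rfl
  have hsp : Option.map (List.map String.toList) (PySem.Str.split? fc "\n")
      = some (PySem.Chars.splitOn fc.toList ['\n']) := by
    rw [PySem.Str.split?_map, hnl]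
    simp [PySem.Chars.split?]
  cases hs : PySem.Str.split? fc "\n" with
  | none => rw [hs] at hsp; simp at hsp
  | some L =>
    rw [hs] at hsp
    simp at hsp
    dsimp only
    simp only [Option.getD_some]
    rw [show (fun (acc : List String) line =>
          if PySem.Str.startswith line "export IMAGE_VERSION=" then
            acc ++ ["export IMAGE_VERSION=" ++ rt]
          else acc ++ [line])
        = (fun (acc : List String) line =>
            acc ++ [if PySem.Str.startswith line "export IMAGE_VERSION=" then
                      "export IMAGE_VERSION=" ++ rt else line]) from
      funext fun acc => funext fun line => by split <;> rfl]
    rw [pvFoldl_eq]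
    simp only [List.nil_append]
    rw [PySem.Str.toList_join, hnl, List.map_map]
    have hcomp : (String.toList ∘ fun line =>
        if PySem.Str.startswith line "export IMAGE_VERSION=" then
          "export IMAGE_VERSION=" ++ rt else line)
        = (fun line => if pvTagPrefix.isPrefixOf line then pvTagPrefix ++ rt.toList else line) ∘ String.toList := by
      funext line
      have hstart : PySem.Str.startswith line "export IMAGE_VERSION="
          = pvTagPrefix.isPrefixOf line.toList := by
        rw [PySem.Str.startswith_eq]
        simp [PySem.Chars.startswith, pvTagPrefix]
      simp only [Function.comp_apply, hstart]
      split <;> simp [String.toList_append, pvTagPrefix]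
    rw [hcomp, ← List.map_map, hsp, pvSplitOn_eq]
    simp only [String.toList_ofList]
    rw [pvMain]
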